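-- pv_equiv track=rewrite | github.com/lsanarchist/fancyMMR | src/fancymmr_build/validation.py | _count_fetch_failure_artifact_formats
-- ===== SOURCE A (Python) =====
-- def _count_fetch_failure_artifact_formats(
--     artifact_links: list[dict[str, object]],
-- ) -> dict[str, int]:
--     format_counts: dict[str, int] = {}
--     for artifact in artifact_links:
--         artifact_format = str(artifact.get("format") or "").lower()
--         if not artifact_format:
--             continue
--         format_counts[artifact_format] = format_counts.get(artifact_format, 0) + 1
--     return {artifact_format: format_counts[artifact_format] for artifact_format in sorted(format_counts)}
-- ===== SOURCE B (Python) =====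
-- from itertools import groupby
--
--
-- def _count_fetch_failure_artifact_formats(
--     artifact_links: list[dict[str, object]],
-- ) -> dict[str, int]:
--     fmts = sorted(
--         s
--         for artifact in artifact_links
--         if (s := str(artifact.get("format") or "").lower())
--     )
--     return {k: sum(1 for _ in g) for k, g in groupby(fmts)}
-- ===== Notes on version B (the rewrite author's own statement) =====
-- stated objective: alternative
-- what changed: Replaces the hash-counter dict plus key sort with a sort-first pipeline: sort the normalized formats and count consecutive runs (itertools.groupby), so no dict is built at all.
import Mathlib
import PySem

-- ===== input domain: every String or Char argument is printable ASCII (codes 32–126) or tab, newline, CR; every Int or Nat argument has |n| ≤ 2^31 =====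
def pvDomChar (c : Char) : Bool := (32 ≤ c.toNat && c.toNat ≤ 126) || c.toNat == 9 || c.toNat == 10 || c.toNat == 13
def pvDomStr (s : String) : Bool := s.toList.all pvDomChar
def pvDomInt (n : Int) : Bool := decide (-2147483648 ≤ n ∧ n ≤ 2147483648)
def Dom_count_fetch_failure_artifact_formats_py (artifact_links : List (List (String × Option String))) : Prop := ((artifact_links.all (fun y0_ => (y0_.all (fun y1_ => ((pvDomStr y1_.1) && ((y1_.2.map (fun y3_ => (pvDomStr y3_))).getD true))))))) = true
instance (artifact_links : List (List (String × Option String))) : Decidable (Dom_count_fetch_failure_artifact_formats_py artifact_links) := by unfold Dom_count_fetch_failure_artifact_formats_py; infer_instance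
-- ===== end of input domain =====

-- B replaces A's hash-counter-dict-then-sort-keys by sort-the-formats-first and count
-- consecutive runs (itertools.groupby); same return value, similar cost ("alternative").

-- ===== PORT A =====
-- A: build a counting dict over the normalized formats, then emit (key, count) for the sorted keys.
def count_fetch_failure_artifact_formats_py (artifact_links : List (List (String × Option String))) : List (String × Int) :=
  let format_counts : PySem.Dict String Int :=
    artifact_links.foldl (fun d artifact =>
      let artifact_format := PySem.Str.lower ((((PySem.Dict.mk artifact).get? "format").getD none).getD "")
      if artifact_format = "" then d
      else d.insert artifact_format (d.getD artifact_format 0 + 1)) PySem.Dict.empty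
  (PySem.List.sorted format_counts.keys (fun k => k) false).map
    (fun artifact_format => (artifact_format, format_counts.getD artifact_format 0))

-- ===== PORT B =====
-- pvRuns l = [(k, len(run)) for k, run in groupby(l)] : run-length encoding of consecutive equal elements.
def pvRuns : List String → List (String × Int)
  | [] => []
  | x :: xs =>
      (x, 1 + ((xs.takeWhile (fun y => y == x)).length : Int)) ::
        pvRuns (xs.dropWhile (fun y => y == x))
termination_by l => l.length
decreasing_by
  simpa using Nat.lt_succ_of_le (List.length_dropWhile_le (fun y => y == x) xs)

-- B: sort the non-empty normalized formats, then count consecutive runs (groupby).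
def count_fetch_failure_artifact_formats_py_alt (artifact_links : List (List (String × Option String))) : List (String × Int) :=
  let fmts := PySem.List.sorted
    ((artifact_links.map (fun artifact =>
        PySem.Str.lower ((((PySem.Dict.mk artifact).get? "format").getD none).getD ""))).filter
      (fun s => s != "")) (fun k => k) false
  pvRuns fmts

-- ===== PRECONDITION & SPEC =====
def Spec_count_fetch_failure_artifact_formats_py (artifact_links : List (List (String × Option String))) (out : List (String × Int)) : Prop := out = count_fetch_failure_artifact_formats_py_alt artifact_links
instance (artifact_links : List (List (String × Option String))) (out : List (String × Int)) : Decidable (Spec_count_fetch_failure_artifact_formats_py artifact_links out) := by unfold Spec_count_fetch_failure_artifact_formats_py; infer_instance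

-- ===== CLAIM (what is proved, stated in full; the proofs are below) =====
def Claim_equal_count_fetch_failure_artifact_formats_py : Prop := ∀ (artifact_links : List (List (String × Option String))), Dom_count_fetch_failure_artifact_formats_py artifact_links → Spec_count_fetch_failure_artifact_formats_py artifact_links (count_fetch_failure_artifact_formats_py artifact_links)

-- ===== LEMMAS AND PROOFS =====

-- Folding Set.add over r keeps a prefix x of the accumulator intact when x never recurs in r.
lemma pvFoldl_add_cons (r : List String) (x : String) :
    ∀ s : List String, x ∉ r → r.foldl PySem.Set.add (x :: s) = x :: r.foldl PySem.Set.add s := by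
  induction r with
  | nil => intro s _; rfl
  | cons y r ih =>
      intro s hx
      have hyx : y ≠ x := fun h => hx (h ▸ List.mem_cons_self)
      have hx' : x ∉ r := fun h => hx (List.mem_cons_of_mem _ h)
      simp only [List.foldl_cons]
      have hadd : PySem.Set.add (x :: s) y =
          x :: PySem.Set.add s y := by
        simp [PySem.Set.add, PySem.Set.contains, hyx]
        split_ifs <;> simp_all
      rw [hadd, ih _ hx']

-- Adding elements already present leaves the set unchanged.
lemma pvFoldl_add_const (t : List String) (x : String) (s : List String)
    (h : ∀ y ∈ t, y = x) (hx : x ∈ s) : t.foldl PySem.Set.add s = s := by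
  induction t with
  | nil => rfl
  | cons y t ih =>
      have hy : y = x := h y List.mem_cons_self
      have : PySem.Set.add s y = s := by
        subst hy
        simp [PySem.Set.add, PySem.Set.contains, hx]
      simp only [List.foldl_cons, this]
      exact ih (fun z hz => h z (List.mem_cons_of_mem _ hz))

-- Set.ofList l extends any accumulator by a sublist of l.
lemma pvOfList_exists_sublist : ∀ (l acc : List String),
    ∃ u, l.foldl PySem.Set.add acc = acc ++ u ∧ u.Sublist l := by
  intro l
  induction l with
  | nil => intro acc; exact ⟨[], by simp⟩
  | cons y l ih =>
      intro acc
      by_cases hy : PySem.Set.contains acc y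
      · obtain ⟨u, hu, hsub⟩ := ih acc
        refine ⟨u, ?_, hsub.cons _⟩
        simp only [List.foldl_cons, PySem.Set.add, hy, if_pos]
        exact hu
      · obtain ⟨u, hu, hsub⟩ := ih (acc ++ [y])
        refine ⟨y :: u, ?_, hsub.cons₂ _⟩
        simp only [List.foldl_cons, PySem.Set.add, hy]
        simpa using hu
      
lemma pvOfList_sublist (l : List String) : (PySem.Set.ofList l).Sublist l := by
  obtain ⟨u, hu, hsub⟩ := pvOfList_exists_sublist l []
  simpa [PySem.Set.ofList_eq_foldl, hu] using hsub

-- On a sorted list, the distinct elements (first occurrences) are strictly increasing.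
lemma pvOfList_pairwise_lt (l : List String) (h : l.Pairwise (· ≤ ·)) :
    (PySem.Set.ofList l).Pairwise (· < ·) := by
  have hle : (PySem.Set.ofList l).Pairwise (· ≤ ·) := h.sublist (pvOfList_sublist l)
  have hne : (PySem.Set.ofList l).Pairwise (· ≠ ·) := PySem.Set.nodup_ofList l
  exact (hle.and hne).imp (fun h => lt_of_le_of_ne h.1 h.2)

-- ofList of a run: head, its copies, then elements never equal to the head.
lemma pvOfList_run (x : String) (t r : List String)
    (ht : ∀ y ∈ t, y = x) (hr : x ∉ r) :
    PySem.Set.ofList (x :: (t ++ r)) = x :: PySem.Set.ofList r := by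
  simp only [PySem.Set.ofList_eq_foldl, List.foldl_cons, List.foldl_append]
  have h1 : PySem.Set.add [] x = [x] := rfl
  rw [h1, pvFoldl_add_const t x [x] ht (by simp), pvFoldl_add_cons r x [] hr]

-- run-length encoding of a sorted list = (distinct elements, their counts)
lemma pvRuns_spec (l : List String) (h : l.Pairwise (· ≤ ·)) :
    pvRuns l = (PySem.Set.ofList l).map (fun k => (k, (l.count k : Int))) := by
  induction l using pvRuns.induct with
  | case1 => simp [pvRuns]
  | case2 x xs ih =>
      set t := xs.takeWhile (fun y => y == x) with hT
      set r := xs.dropWhile (fun y => y == x) with hR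
      have hxs : t ++ r = xs := List.takeWhile_append_dropWhile
      have ht : ∀ y ∈ t, y = x := by
        intro y hy
        have := List.mem_takeWhile_imp hy
        simpa using this
      have hxr : ∀ y ∈ r, x < y := by
        intro y hy
        have hsubr : r.Sublist xs := List.dropWhile_sublist _
        have hyxs : y ∈ xs := hsubr.mem hy
        have hxle : x ≤ y := (List.pairwise_cons.mp h).1 y hyxs
        have hrp : r.Pairwise (· ≤ ·) :=
          ((List.pairwise_cons.mp h).2).sublist hsubr
        cases hrl : r with
        | nil => simp [hrl] at hy
        | cons z r' =>
            have hz : ¬ (z == x) = true := by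
              have := List.head?_dropWhile_not (fun y => y == x) xs
              rw [← hR, hrl] at this
              simpa using this
            have hzx : z ≠ x := by simpa using hz
            have hxz : x < z := lt_of_le_of_ne
              ((List.pairwise_cons.mp h).1 z (hsubr.mem (hrl ▸ List.mem_cons_self))) (Ne.symm hzx)
            rw [hrl] at hy
            rcases List.mem_cons.mp hy with rfl | hy'
            · exact hxz
            · have hzy : z ≤ y := by
                rw [hrl] at hrp
                exact (List.pairwise_cons.mp hrp).1 y hy'
              exact lt_of_lt_of_le hxz hzy
      have hxnr : x ∉ r := fun hx => lt_irrefl x (hxr x hx)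
      have hrp : r.Pairwise (· ≤ ·) :=
        ((List.pairwise_cons.mp h).2).sublist (List.dropWhile_sublist _)
      have hcx : (x :: xs).count x = 1 + t.length := by
        rw [← hxs, List.count_cons_self, List.count_append]
        have h1 : t.count x = t.length := by
          rw [List.count_eq_length.mpr (fun y hy => ((ht y hy).symm ▸ rfl))]
        have h2 : r.count x = 0 := List.count_eq_zero.mpr hxnr
        omega
      have hck : ∀ k ∈ PySem.Set.ofList r, (x :: xs).count k = r.count k := by
        intro k hk
        have hkr : k ∈ r := (PySem.Set.mem_ofList r k).mp hk
        have hkx : k ≠ x := fun h => hxnr (h ▸ hkr)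
        have hkt : k ∉ t := fun hkt => hkx (ht k hkt)
        rw [← hxs]
        simp [List.count_append, List.count_eq_zero.mpr hkt, Ne.symm hkx]
      rw [pvRuns, ← hT, ← hR, ih hrp, ← hxs, pvOfList_run x t r ht hxnr, hxs]
      simp only [List.map_cons]
      congr 1
      · simp [hcx]
      · exact List.map_congr_left (fun k hk => by simp [hck k hk])

-- A's counting loop over the artifact list is Counter(fmts) for the filtered normalized formats.
lemma pvCounterA (artifact_links : List (List (String × Option String))) :
    artifact_links.foldl (fun d artifact =>
      let artifact_format := PySem.Str.lower ((((PySem.Dict.mk artifact).get? "format").getD none).getD "")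
      if artifact_format = "" then d
      else d.insert artifact_format (d.getD artifact_format 0 + 1)) PySem.Dict.empty
    = PySem.Dict.counter
        ((artifact_links.map (fun artifact =>
            PySem.Str.lower ((((PySem.Dict.mk artifact).get? "format").getD none).getD ""))).filter
          (fun s => s != "")) := by
  set f : List (String × Option String) → String := fun artifact =>
    PySem.Str.lower ((((PySem.Dict.mk artifact).get? "format").getD none).getD "") with hf
  have h1 : artifact_links.foldl (fun d artifact =>
      if f artifact = "" then d
      else d.insert (f artifact) (d.getD (f artifact) 0 + 1))
        (PySem.Dict.empty : PySem.Dict String Int)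
      = artifact_links.foldl (fun d artifact =>
          if ¬ (f artifact = "")
          then d.insert (f artifact) (d.getD (f artifact) 0 + 1) else d)
        (PySem.Dict.empty : PySem.Dict String Int) := by
    apply PySem.List.foldl_congr_mem
    intro acc a _
    by_cases hfa : f a = "" <;> simp [hfa]
  show artifact_links.foldl (fun d artifact =>
      if f artifact = "" then d
      else d.insert (f artifact) (d.getD (f artifact) 0 + 1)) PySem.Dict.empty
    = PySem.Dict.counter ((artifact_links.map f).filter (fun s => s != ""))
  refine h1.trans ?_
  rw [PySem.List.foldl_ite_eq_foldl_filter]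
  have h2 : (artifact_links.map f).filter (fun s => s != "")
      = (artifact_links.filter (fun a => decide ¬ (f a = ""))).map f := by
    rw [List.filter_map]
    congr 1
    apply List.filter_congr
    intro a _
    by_cases hfa : f a = "" <;> simp [Function.comp, bne, hfa]
  have h3 : ((artifact_links.filter (fun a => decide ¬ (f a = ""))).map f).foldl
      (fun (d : PySem.Dict String Int) s => d.insert s (d.getD s 0 + 1)) PySem.Dict.empty
      = (artifact_links.filter (fun a => decide ¬ (f a = ""))).foldl
        (fun (d : PySem.Dict String Int) a => d.insert (f a) (d.getD (f a) 0 + 1))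
        PySem.Dict.empty := by
    rw [List.foldl_map]
  rw [h2, ← h3, PySem.Dict.foldl_insert_getD_add_one_eq_counter]

-- ===== VERDICT (by name: the statement is the Claim_ definition above) =====
theorem count_fetch_failure_artifact_formats_py_spec : Claim_equal_count_fetch_failure_artifact_formats_py := by
  intro artifact_links _
  unfold Spec_count_fetch_failure_artifact_formats_py
  simp only [count_fetch_failure_artifact_formats_py, count_fetch_failure_artifact_formats_py_alt]
  set fmts := ((artifact_links.map (fun artifact =>
      PySem.Str.lower ((((PySem.Dict.mk artifact).get? "format").getD none).getD ""))).filter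
    (fun s => s != "")) with hfmts
  rw [pvCounterA, ← hfmts]
  set s := PySem.List.sorted fmts (fun k => k) false with hs
  have hsp : s.Pairwise (· ≤ ·) := PySem.List.sorted_pairwise fmts (fun k => k)
  have hperm : s.Perm fmts := PySem.List.sorted_perm fmts (fun k => k) false
  have hkeys : (PySem.Dict.counter fmts).keys = PySem.Set.ofList fmts :=
    PySem.Dict.keys_counter fmts
  have hsortkeys : PySem.List.sorted (PySem.Set.ofList fmts) (fun k => k) false
      = PySem.Set.ofList s := by
    apply PySem.List.sorted_eq_of_perm_of_pairwise_lt
    · rw [List.perm_ext_iff_of_nodup (PySem.Set.nodup_ofList s) (PySem.Set.nodup_ofList fmts)]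
      intro a
      rw [PySem.Set.mem_ofList, PySem.Set.mem_ofList]
      exact ⟨fun h => hperm.mem_iff.mp h, fun h => hperm.mem_iff.mpr h⟩
    · exact pvOfList_pairwise_lt s hsp
  rw [hkeys, hsortkeys, pvRuns_spec s hsp]
  apply List.map_congr_left
  intro k _
  simp [PySem.Dict.getD_counter, hperm.count_eq]
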